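-- pv_equiv track=rewrite | github.com/shanevigil/specy-road | specy_road/bundled_scripts/roadmap_load.py | compute_rollup_status
-- ===== SOURCE A (Python) =====
-- _STATUS_PRECEDENCE = {
--     "Not Started": 0,
--     "In Progress": 1,
--     "Blocked": 2,
--     "Complete": 3,
-- }
--
-- _UNKNOWN_STATUS_RANK = -1
--
-- def _rank(status: str | None) -> int:
--     if not isinstance(status, str):
--         return _UNKNOWN_STATUS_RANK
--     return _STATUS_PRECEDENCE.get(status, _UNKNOWN_STATUS_RANK)
--
-- def _children_map(nodes: list[dict]) -> dict[str, list[str]]: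
--     out: dict[str, list[str]] = {}
--     for n in nodes:
--         pid = n.get("parent_id")
--         if isinstance(pid, str) and pid:
--             out.setdefault(pid, []).append(n["id"])
--     return out
--
-- def compute_rollup_status(nodes: list[dict]) -> dict[str, str]:
--     """
--     Return ``{node_id: rollup_status}`` for every node.
--
--     Leaf rollup is the node's own ``status``. Non-leaf rollup is ``Complete``
--     when every leaf descendant is ``Complete``, else the highest-precedence
--     status among leaf descendants (``Blocked`` > ``In Progress`` >
--     ``Not Started``). Nodes with unknown/invalid status contribute as
--     ``Not Started``.
--     """
--     by_id = {n["id"]: n for n in nodes if isinstance(n.get("id"), str)}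
--     children = _children_map(nodes)
--     cache: dict[str, str] = {}
--
--     def leaf_statuses(nid: str) -> list[str]:
--         kids = children.get(nid, [])
--         if not kids:
--             s = by_id.get(nid, {}).get("status")
--             return [s if isinstance(s, str) else "Not Started"]
--         out: list[str] = []
--         for k in kids:
--             out.extend(leaf_statuses(k))
--         return out
--
--     for nid in by_id:
--         kids = children.get(nid, [])
--         if not kids:
--             s = by_id[nid].get("status")
--             cache[nid] = s if isinstance(s, str) else "Not Started"
--             continue
--         descendants = leaf_statuses(nid)
--         if descendants and all(s == "Complete" for s in descendants):
--             cache[nid] = "Complete"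
--             continue
--         # Pick the highest-precedence status among leaf descendants, excluding
--         # the "Complete" pile (since not all are Complete, mark with the most
--         # pressing not-yet-Complete status).
--         non_complete = [s for s in descendants if s != "Complete"]
--         if not non_complete:
--             # Shouldn't happen given the previous branch, but defensive.
--             cache[nid] = "Complete"
--             continue
--         best = max(non_complete, key=_rank)
--         cache[nid] = best
--     return cache
-- ===== SOURCE B (Python) =====
-- _STATUS_PRECEDENCE = {
--     "Not Started": 0,
--     "In Progress": 1,
--     "Blocked": 2,
--     "Complete": 3,
-- }
--
-- _UNKNOWN_STATUS_RANK = -1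
--
--
-- def _rank(status):
--     if not isinstance(status, str):
--         return _UNKNOWN_STATUS_RANK
--     return _STATUS_PRECEDENCE.get(status, _UNKNOWN_STATUS_RANK)
--
--
-- def compute_rollup_status(nodes):
--     # One pass builds both indexes; each rollup is then computed by a single
--     # post-order aggregation of a constant-size pair (all-complete flag, best
--     # non-complete status) instead of materialising every leaf-status list
--     # and re-scanning it with all()/filter()/max().
--     by_id = {}
--     children = {}
--     for n in nodes:
--         nid = n.get("id")
--         if isinstance(nid, str):
--             by_id[nid] = n
--         pid = n.get("parent_id")
--         if isinstance(pid, str) and pid: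
--             children.setdefault(pid, []).append(n["id"])
--
--     def agg(nid):
--         # returns (all leaf descendants Complete?, best non-Complete leaf status or None)
--         kids = children.get(nid, [])
--         if not kids:
--             s = by_id.get(nid, {}).get("status")
--             s = s if isinstance(s, str) else "Not Started"
--             return (s == "Complete", None if s == "Complete" else s)
--         all_c = True
--         best = None
--         for k in kids:
--             c_all, c_best = agg(k)
--             all_c = all_c and c_all
--             if c_best is not None and (best is None or _rank(best) < _rank(c_best)):
--                 best = c_best
--         return (all_c, best)
--
--     out = {}
--     for nid in by_id:
--         all_c, best = agg(nid)
--         out[nid] = "Complete" if all_c else best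
--     return out
-- ===== Notes on version B (the rewrite author's own statement) =====
-- stated objective: alternative
-- what changed: Instead of materialising the full list of leaf-descendant statuses for every non-leaf node and rescanning it with all(), a filter and max(key=_rank), B does one post-order aggregation per node that carries only a constant-size pair (all-complete flag, best non-complete status), and builds by_id and children in a single pass over nodes.
import Mathlib
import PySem

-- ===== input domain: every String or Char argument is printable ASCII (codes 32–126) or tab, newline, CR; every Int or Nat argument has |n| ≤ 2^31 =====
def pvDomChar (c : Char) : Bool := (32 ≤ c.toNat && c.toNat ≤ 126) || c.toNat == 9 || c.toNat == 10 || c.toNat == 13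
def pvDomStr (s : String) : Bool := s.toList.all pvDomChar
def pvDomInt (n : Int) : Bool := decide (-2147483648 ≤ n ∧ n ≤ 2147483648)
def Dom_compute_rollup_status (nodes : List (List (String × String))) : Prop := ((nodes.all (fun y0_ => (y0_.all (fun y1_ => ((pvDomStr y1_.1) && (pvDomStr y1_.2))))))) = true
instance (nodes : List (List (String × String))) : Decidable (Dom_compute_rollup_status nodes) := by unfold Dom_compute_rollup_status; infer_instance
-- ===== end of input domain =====

-- B replaces A's per-node leaf-status list building (plus all()/filter()/max() rescans)
-- by one post-order aggregation of a constant-size (all-complete, best-non-complete) pair;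
-- objective: alternative/leaner per-node work. Return-value equivalence only.

-- shared module helpers (both Pythons use the same node dicts and _rank)

-- n.get(k) on a node dict (assoc list, first match)
def alGet? (n : List (String × String)) (k : String) : Option String :=
  (n.find? (fun p => p.1 == k)).map (·.2)

-- _rank: _STATUS_PRECEDENCE.get(status, -1)
def rankSt (s : String) : Int :=
  if s = "Not Started" then 0
  else if s = "In Progress" then 1
  else if s = "Blocked" then 2
  else if s = "Complete" then 3
  else -1

-- ===== PORT A =====

-- by_id = {n["id"]: n for n in nodes if isinstance(n.get("id"), str)}
def byIdA (nodes : List (List (String × String))) : PySem.Dict String (List (String × String)) :=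
  nodes.foldl (fun d n =>
    match alGet? n "id" with
    | some i => d.insert i n
    | none => d) PySem.Dict.empty

-- _children_map; Pre_ guarantees n["id"] exists where it is read (Python raises KeyError otherwise)
def childrenA (nodes : List (List (String × String))) : PySem.Dict String (List String) :=
  nodes.foldl (fun d n =>
    match alGet? n "parent_id" with
    | some p => if p = "" then d else d.modify p [] (· ++ [(alGet? n "id").getD ""])
    | none => d) PySem.Dict.empty

-- leaf_statuses, fuel-bounded (fuel nodes.length+1 suffices on every acyclic input)
def leafStatuses (ch : PySem.Dict String (List String))
    (bi : PySem.Dict String (List (String × String))) : Nat → String → List String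
  | 0, _ => []
  | f + 1, nid =>
    let kids := ch.getD nid []
    if kids = [] then
      [(alGet? (bi.getD nid []) "status").getD "Not Started"]
    else
      kids.foldl (fun out k => out ++ leafStatuses ch bi f k) []

def compute_rollup_status (nodes : List (List (String × String))) : List (String × String) :=
  let bi := byIdA nodes
  let ch := childrenA nodes
  let fuel := nodes.length + 1
  (bi.keys.foldl (fun cache nid =>
    cache.insert nid (
      let kids := ch.getD nid []
      if kids = [] then
        (alGet? (bi.getD nid []) "status").getD "Not Started"
      else
        let ds := leafStatuses ch bi fuel nid
        if ds ≠ [] ∧ ds.all (fun s => s == "Complete") then "Complete"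
        else
          let nc := ds.filter (fun s => !(s == "Complete"))
          if nc = [] then "Complete"
          else (PySem.List.max? nc rankSt).getD "")) PySem.Dict.empty).items

-- ===== PORT B =====

-- one pass building both by_id and children
def buildMapsB (nodes : List (List (String × String))) :
    PySem.Dict String (List (String × String)) × PySem.Dict String (List String) :=
  nodes.foldl (fun acc n =>
    let bi := match alGet? n "id" with
      | some i => acc.1.insert i n
      | none => acc.1
    let ch := match alGet? n "parent_id" with
      | some p => if p = "" then acc.2 else acc.2.modify p [] (· ++ [(alGet? n "id").getD ""])
      | none => acc.2
    (bi, ch)) (PySem.Dict.empty, PySem.Dict.empty)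

-- the inner best-status update of agg's loop
def mergeBest (b c : Option String) : Option String :=
  match c with
  | none => b
  | some s =>
    match b with
    | none => some s
    | some t => if rankSt t < rankSt s then some s else some t

-- agg: post-order aggregation of (all-complete, best non-Complete status), fuel-bounded
def agg (ch : PySem.Dict String (List String))
    (bi : PySem.Dict String (List (String × String))) : Nat → String → Bool × Option String
  | 0, _ => (true, none)
  | f + 1, nid =>
    let kids := ch.getD nid []
    if kids = [] then
      let s := (alGet? (bi.getD nid []) "status").getD "Not Started"
      (s == "Complete", if s == "Complete" then none else some s)
    else
      kids.foldl (fun acc k =>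
        let c := agg ch bi f k
        (acc.1 && c.1, mergeBest acc.2 c.2)) (true, none)

def compute_rollup_status_alt (nodes : List (List (String × String))) : List (String × String) :=
  let m := buildMapsB nodes
  let fuel := nodes.length + 1
  (m.1.keys.foldl (fun out nid =>
    let r := agg m.2 m.1 fuel nid
    out.insert nid (if r.1 then "Complete" else r.2.getD "Complete")) PySem.Dict.empty).items

-- ===== PRECONDITION & SPEC =====

-- edges of the parent graph: (parent_id, id) for every node carrying both
def pvEdges (nodes : List (List (String × String))) : List (String × String) :=
  nodes.filterMap (fun n =>
    match alGet? n "parent_id", alGet? n "id" with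
    | some p, some i => if p = "" then none else some (p, i)
    | _, _ => none)

def pvSuccs (E : List (String × String)) (x : String) : List String :=
  (E.filter (fun e => e.1 == x)).map (·.2)

-- ids reachable from the frontier in ≤ f steps (frontier deduplicated each level)
def pvReach (E : List (String × String)) : Nat → List String → List String
  | 0, fr => fr
  | f + 1, fr => fr ++ pvReach E f (PySem.Set.ofList (fr.flatMap (pvSuccs E)))

-- Pre_ excludes exactly the inputs on which Python A raises: a node whose non-empty
-- parent_id comes without an "id" key (KeyError in _children_map), and a cyclic
-- parent graph (unbounded recursion in leaf_statuses).
def Pre_compute_rollup_status (nodes : List (List (String × String))) : Prop :=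
  (∀ n ∈ nodes, (∃ p, alGet? n "parent_id" = some p ∧ p ≠ "") → (alGet? n "id").isSome) ∧
  (∀ e ∈ pvEdges nodes, e.1 ∉ pvReach (pvEdges nodes) (pvEdges nodes).length (pvSuccs (pvEdges nodes) e.1))
instance (nodes : List (List (String × String))) : Decidable (Pre_compute_rollup_status nodes) := by
  unfold Pre_compute_rollup_status; infer_instance

def pvWitness_compute_rollup_status : (List (List (String × String))) :=
  [[("id", "r"), ("status", "In Progress")],
   [("id", "a"), ("parent_id", "r"), ("status", "Complete")],
   [("id", "b"), ("parent_id", "r"), ("status", "Blocked")]]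

def Spec_compute_rollup_status (nodes : List (List (String × String))) (out : List (String × String)) : Prop := out = compute_rollup_status_alt nodes
instance (nodes : List (List (String × String))) (out : List (String × String)) : Decidable (Spec_compute_rollup_status nodes out) := by unfold Spec_compute_rollup_status; infer_instance

-- ===== CLAIM (what is proved, stated in full; the proofs are below) =====
def Claim_equal_compute_rollup_status : Prop := ∀ (nodes : List (List (String × String))), Dom_compute_rollup_status nodes → Pre_compute_rollup_status nodes → Spec_compute_rollup_status nodes (compute_rollup_status nodes)

-- ===== LEMMAS AND PROOFS =====

-- the one-step accumulator of the best-non-Complete fold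
def stepBest (b : Option String) (s : String) : Option String :=
  if s == "Complete" then b else mergeBest b (some s)

-- summary of a leaf-status list: (all Complete?, best non-Complete)
def summar (L : List String) : Bool × Option String :=
  (L.all (fun s => s == "Complete"), L.foldl stepBest none)

theorem mergeBest_assoc (a b c : Option String) :
    mergeBest (mergeBest a b) c = mergeBest a (mergeBest b c) := by
  cases a with
  | none =>
      cases b <;> cases c <;> (try rfl)
      simp only [mergeBest]; split <;> rfl
  | some x => cases b with
    | none => cases c <;> rfl
    | some y => cases c with
      | none => rfl
      | some z =>
        simp only [mergeBest]
        by_cases h1 : rankSt x < rankSt y <;> by_cases h2 : rankSt y < rankSt z <;>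
          simp only [h1, h2, if_pos, ite_false] <;>
          split_ifs <;> first | rfl | omega

theorem mergeBest_none (b : Option String) : mergeBest none b = b := by
  cases b <;> rfl

theorem foldl_stepBest_shift (l : List String) :
    ∀ b, l.foldl stepBest b = mergeBest b (l.foldl stepBest none) := by
  induction l with
  | nil => intro b; cases b <;> rfl
  | cons s l ih =>
    intro b
    simp only [List.foldl_cons, ih (stepBest b s), ih (stepBest none s)]
    by_cases h : s == "Complete"
    · simp [stepBest, h, mergeBest_none]
    · simp only [stepBest, h, Bool.false_eq_true, ite_false, mergeBest_none]
      rw [mergeBest_assoc]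

theorem summar_append (xs ys : List String) :
    summar (xs ++ ys) = ((summar xs).1 && (summar ys).1, mergeBest (summar xs).2 (summar ys).2) := by
  simp only [summar, List.all_append, List.foldl_append]
  rw [foldl_stepBest_shift ys]

theorem agg_eq_summar (ch : PySem.Dict String (List String))
    (bi : PySem.Dict String (List (String × String))) :
    ∀ (f : Nat) (nid : String), agg ch bi f nid = summar (leafStatuses ch bi f nid) := by
  intro f
  induction f with
  | zero => intro nid; rfl
  | succ f ih =>
    intro nid
    simp only [agg, leafStatuses]
    by_cases hk : ch.getD nid [] = []
    · simp only [hk]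
      by_cases h : ((alGet? (bi.getD nid []) "status").getD "Not Started") == "Complete" <;>
        simp [summar, stepBest, mergeBest, h]
    · simp only [if_neg hk]
      have key : ∀ (ks : List String) (acc : List String),
          ks.foldl (fun p k =>
            (p.1 && (agg ch bi f k).1, mergeBest p.2 (agg ch bi f k).2)) (summar acc)
          = summar (ks.foldl (fun out k => out ++ leafStatuses ch bi f k) acc) := by
        intro ks
        induction ks with
        | nil => intro acc; rfl
        | cons k ks ihk =>
          intro acc
          simp only [List.foldl_cons]
          rw [← ihk (acc ++ leafStatuses ch bi f k), summar_append, ih k]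
      exact key (ch.getD nid []) []

-- the non-Complete fold equals filter-then-(first-max)
theorem foldl_stepBest_eq_max? (L : List String) :
    L.foldl stepBest none = PySem.List.max? (L.filter (fun s => !(s == "Complete"))) rankSt := by
  have key : ∀ (l : List String) (b : Option String),
      l.foldl stepBest b
      = (l.filter (fun s => !(s == "Complete"))).foldl (fun acc x =>
          match acc with
          | none => some x
          | some m => if rankSt m < rankSt x then some x else some m) b := by
    intro l
    induction l with
    | nil => intro b; rfl
    | cons s l ihl =>
      intro b
      by_cases h : s == "Complete"
      · simpa [stepBest, h] using ihl b
      · simp only [List.foldl_cons, List.filter_cons, h, Bool.not_false, if_pos]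
        rw [ihl]
        congr 1
        cases b <;> simp [stepBest, mergeBest, h]
  rw [key]
  simp only [PySem.List.max?]
  congr 1
  funext acc x
  cases acc <;> rfl

-- per-node value agreement between the two main loops
theorem value_eq (nodes : List (List (String × String))) (nid : String) :
    (let r := agg (childrenA nodes) (byIdA nodes) (nodes.length + 1) nid
     if r.1 then "Complete" else r.2.getD "Complete")
    = (let ch := childrenA nodes
       let bi := byIdA nodes
       let kids := ch.getD nid []
       if kids = [] then
         (alGet? (bi.getD nid []) "status").getD "Not Started"
       else
         let ds := leafStatuses ch bi (nodes.length + 1) nid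
         if ds ≠ [] ∧ ds.all (fun s => s == "Complete") then "Complete"
         else
           let nc := ds.filter (fun s => !(s == "Complete"))
           if nc = [] then "Complete"
           else (PySem.List.max? nc rankSt).getD "") := by
  simp only [agg_eq_summar]
  by_cases hk : (childrenA nodes).getD nid [] = []
  · -- leaf: one unfolding of leafStatuses gives the singleton status list
    simp only [hk, leafStatuses]
    by_cases h : (alGet? ((byIdA nodes).getD nid []) "status").getD "Not Started" = "Complete"
    · simp [h, summar]
    · simp [h, summar, stepBest, mergeBest]
  · simp only [if_neg hk]
    set ds := leafStatuses (childrenA nodes) (byIdA nodes) (nodes.length + 1) nid with hds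
    by_cases hall : ds.all (fun s => s == "Complete")
    · -- all Complete (or empty): both sides give "Complete"
      have hfil : ds.filter (fun s => !(s == "Complete")) = [] := by
        rw [List.filter_eq_nil_iff]
        intro a ha
        simpa using (List.all_eq_true.mp hall a ha)
      rcases eq_or_ne ds [] with h | h
      · simp [h, summar]
      · simp [summar, hall, h]
    · -- some non-Complete: both sides give the first max-rank non-Complete status
      have hallf : ds.all (fun s => s == "Complete") = false := eq_false_of_ne_true hall
      have hne : ds ≠ [] := by
        intro hnil
        rw [hnil] at hallf
        simp at hallf
      have hfil : ds.filter (fun s => !(s == "Complete")) ≠ [] := by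
        intro hc
        apply hall
        rw [List.all_eq_true]
        intro a ha
        have := (List.filter_eq_nil_iff.mp hc) a ha
        simpa using this
      obtain ⟨m, hm⟩ : ∃ m, PySem.List.max? (ds.filter (fun s => !(s == "Complete"))) rankSt = some m := by
        cases hmo : PySem.List.max? (ds.filter (fun s => !(s == "Complete"))) rankSt with
        | none => exact absurd (((PySem.List.max?_eq_none_iff _ _).mp hmo)) hfil
        | some m => exact ⟨m, rfl⟩
      simp [summar, hallf, hne, hfil, hm, foldl_stepBest_eq_max?]

-- build-maps fusion: B's single pass produces A's two dicts
theorem buildMapsB_eq (nodes : List (List (String × String))) :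
    buildMapsB nodes = (byIdA nodes, childrenA nodes) := by
  have key : ∀ (l : List (List (String × String)))
      (bi : PySem.Dict String (List (String × String))) (ch : PySem.Dict String (List String)),
      l.foldl (fun acc n =>
        let bi' := match alGet? n "id" with
          | some i => acc.1.insert i n
          | none => acc.1
        let ch' := match alGet? n "parent_id" with
          | some p => if p = "" then acc.2 else acc.2.modify p [] (· ++ [(alGet? n "id").getD ""])
          | none => acc.2
        (bi', ch')) (bi, ch)
      = (l.foldl (fun d n => match alGet? n "id" with
          | some i => d.insert i n
          | none => d) bi,
         l.foldl (fun d n => match alGet? n "parent_id" with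
          | some p => if p = "" then d else d.modify p [] (· ++ [(alGet? n "id").getD ""])
          | none => d) ch) := by
    intro l
    induction l with
    | nil => intro bi ch; rfl
    | cons n l ihl => intro bi ch; simp only [List.foldl_cons]; rw [ihl]
  exact key nodes PySem.Dict.empty PySem.Dict.empty

-- folding the same keys with pointwise-equal values yields the same dict
theorem foldl_insert_congr (f g : String → String) (h : ∀ k, f k = g k) :
    ∀ (ks : List String) (d : PySem.Dict String String),
      ks.foldl (fun d k => d.insert k (f k)) d = ks.foldl (fun d k => d.insert k (g k)) d := by
  intro ks
  induction ks with
  | nil => intro d; rfl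
  | cons k ks ih => intro d; simp only [List.foldl_cons, h k, ih]

-- ===== VERDICT (by name: the statement is the Claim_ definition above) =====
theorem compute_rollup_status_spec : Claim_equal_compute_rollup_status := by
  intro nodes _ _
  unfold Spec_compute_rollup_status compute_rollup_status compute_rollup_status_alt
  rw [buildMapsB_eq]
  exact congrArg PySem.Dict.items
    (foldl_insert_congr _ _ (fun nid => (value_eq nodes nid).symm) (byIdA nodes).keys
      PySem.Dict.empty)
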